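-- pv_equiv track=rewrite | github.com/dreamoffeature/jibao_back | jibao/ocr_model.py | _fix_ocr_char_confusion
-- ===== SOURCE A (Python) =====
-- def _fix_ocr_char_confusion(text: str) -> str:
--     """修复OCR常见的字符混淆问题"""
--     if not text:
--         return text
--     # 常见混淆映射：键为错误字符，值为正确字符
--     confusion_map = {
--         'O': '0',  # 字母O → 数字0
--         'o': '0',  # 小写o → 数字0
--         'l': '1',  # 字母l → 数字1
--     }
--     # 替换混淆字符
--     fixed_text = text
--     for wrong_char, right_char in confusion_map.items():
--         fixed_text = fixed_text.replace(wrong_char, right_char)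
--     return fixed_text
-- ===== SOURCE B (Python) =====
-- def _fix_ocr_char_confusion(text: str) -> str:
--     """修复OCR常见的字符混淆问题 — single pass, per-character lookup."""
--     confusion_map = {
--         'O': '0',
--         'o': '0',
--         'l': '1',
--     }
--     return ''.join(confusion_map.get(c, c) for c in text)
-- ===== Notes on version B (the rewrite author's own statement) =====
-- stated objective: idiomatic
-- what changed: Replaces three sequential full-string str.replace passes with one single pass over the characters translating each via a dict lookup (safe because no mapped output value is itself a key).
import Mathlib
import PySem

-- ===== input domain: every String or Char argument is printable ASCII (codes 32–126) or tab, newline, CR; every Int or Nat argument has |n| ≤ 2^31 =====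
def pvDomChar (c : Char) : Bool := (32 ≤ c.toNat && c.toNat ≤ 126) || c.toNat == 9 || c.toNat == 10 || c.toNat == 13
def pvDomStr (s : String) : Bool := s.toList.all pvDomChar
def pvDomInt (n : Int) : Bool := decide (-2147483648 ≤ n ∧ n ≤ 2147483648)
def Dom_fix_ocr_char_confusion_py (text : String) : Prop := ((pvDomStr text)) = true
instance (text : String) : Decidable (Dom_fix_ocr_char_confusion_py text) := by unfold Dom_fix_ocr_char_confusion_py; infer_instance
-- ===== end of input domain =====

-- B replaces A's three sequential str.replace passes with one per-character dict-lookup pass (idiomatic; exact because no mapped value is itself a key).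

-- ===== PORT A =====
def fix_ocr_char_confusion_py (text : String) : String :=
  if text = "" then text
  else
    -- confusion_map as a PySem.Dict, iterated in insertion order
    let confusion_map : PySem.Dict String String :=
      ((PySem.Dict.empty.insert "O" "0").insert "o" "0").insert "l" "1"
    confusion_map.items.foldl
      (fun fixed_text p => PySem.Str.replace fixed_text p.1 p.2) text

-- ===== PORT B =====
def fix_ocr_char_confusion_py_alt (text : String) : String :=
  let confusion_map : PySem.Dict Char Char :=
    ((PySem.Dict.empty.insert 'O' '0').insert 'o' '0').insert 'l' '1'
  -- ''.join(confusion_map.get(c, c) for c in text): each piece is one char, so the join is a map over the characters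
  String.ofList (text.toList.map (fun c => confusion_map.getD c c))

-- ===== PRECONDITION & SPEC =====
def Spec_fix_ocr_char_confusion_py (text : String) (out : String) : Prop := out = fix_ocr_char_confusion_py_alt text
instance (text : String) (out : String) : Decidable (Spec_fix_ocr_char_confusion_py text out) := by unfold Spec_fix_ocr_char_confusion_py; infer_instance

-- ===== CLAIM (what is proved, stated in full; the proofs are below) =====
def Claim_equal_fix_ocr_char_confusion_py : Prop := ∀ (text : String), Dom_fix_ocr_char_confusion_py text → Spec_fix_ocr_char_confusion_py text (fix_ocr_char_confusion_py text)

-- ===== LEMMAS AND PROOFS =====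

-- single-character replace is a map over the characters
theorem replace_go_single (a b : Char) : ∀ (l acc : List Char) (fuel : Nat), l.length ≤ fuel →
    PySem.Chars.replace.go [a] [b] fuel l acc
      = acc.reverse ++ l.map (fun c => if c = a then b else c) := by
  intro l
  induction l with
  | nil =>
      intro acc fuel _
      cases fuel <;> simp [PySem.Chars.replace.go]
  | cons c t ih =>
      intro acc fuel hf
      cases fuel with
      | zero => simp at hf
      | succ n =>
          simp only [List.length_cons, Nat.succ_le_succ_iff] at hf
          by_cases h : c = a
          · subst h
            have hpre : List.isPrefixOf [c] (c :: t) = true := by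
              simp [List.isPrefixOf]
            rw [PySem.Chars.replace.go] ; simp only [hpre, if_true]
            simp only [List.length_cons, List.length_nil, List.drop_succ_cons, List.drop_zero]
            rw [ih _ n hf]
            simp
          · have hpre : List.isPrefixOf [a] (c :: t) = false := by
              simp [List.isPrefixOf]
              intro hh ; exact h hh.symm
            rw [PySem.Chars.replace.go] ; simp only [hpre]
            rw [ih _ n hf]
            simp [h]

theorem replace_single (a b : Char) (l : List Char) :
    PySem.Chars.replace l [a] [b] = l.map (fun c => if c = a then b else c) := by
  rw [PySem.Chars.replace]
  simp only [List.isEmpty_cons]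
  rw [replace_go_single a b l [] l.length le_rfl]
  simp

-- ===== VERDICT (by name: the statement is the Claim_ definition above) =====
theorem fix_ocr_char_confusion_py_spec : Claim_equal_fix_ocr_char_confusion_py := by
  unfold Claim_equal_fix_ocr_char_confusion_py
  intro text _
  unfold Spec_fix_ocr_char_confusion_py fix_ocr_char_confusion_py fix_ocr_char_confusion_py_alt
  by_cases h : text = ""
  · subst h; decide
  · simp only [h, if_false]
    refine String.toList_inj.mp ?_
    have hitems : (((PySem.Dict.empty.insert "O" "0").insert "o" "0").insert "l" "1" :
        PySem.Dict String String).items = [("O", "0"), ("o", "0"), ("l", "1")] := by decide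
    simp only [hitems, List.foldl, PySem.Str.toList_replace, String.toList_ofList]
    simp only [show ("O" : String).toList = ['O'] from rfl, show ("0" : String).toList = ['0'] from rfl,
      show ("o" : String).toList = ['o'] from rfl, show ("1" : String).toList = ['1'] from rfl,
      show ("l" : String).toList = ['l'] from rfl]
    simp only [replace_single, List.map_map]
    refine List.map_congr_left ?_
    intro c _
    by_cases h1 : c = 'O'
    · subst h1; decide
    by_cases h2 : c = 'o'
    · subst h2; decide
    by_cases h3 : c = 'l'
    · subst h3; decide
    have e1 : ('O' == c) = false := beq_eq_false_iff_ne.mpr (Ne.symm h1)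
    have e2 : ('o' == c) = false := beq_eq_false_iff_ne.mpr (Ne.symm h2)
    have e3 : ('l' == c) = false := beq_eq_false_iff_ne.mpr (Ne.symm h3)
    have hd : (((PySem.Dict.empty.insert 'O' '0').insert 'o' '0').insert 'l' '1' :
        PySem.Dict Char Char).items = [('O', '0'), ('o', '0'), ('l', '1')] := by decide
    rw [PySem.Dict.getD, PySem.Dict.get?, hd]
    simp [List.find?, e1, e2, e3, h1, h2, h3]
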